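-- pv_equiv track=rewrite | github.com/akivajp/acl2015 | explib-python/lib/exp/ruletable/record.py | getTravatarSymbols
-- ===== SOURCE A (Python) =====
-- def getTravatarSymbols(rule):
--   symbols = []
--   for s in rule.split(' '):
--     if len(s) < 2:
--       if s == "@":
--         break
--     elif s[0] == '"' and s[-1] == '"':
--       symbols.append(s[1:-1])
--     elif s[0] == 'x' and s[1].isdigit():
--       if len(s) > 3:
--         symbols.append('[%s]' % s[3:])
--       else:
--         symbols.append('[X]')
--   return symbols
-- ===== SOURCE B (Python) =====
-- def getTravatarSymbols(rule):
--     # character-level state machine: scan the rule once, building each token in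
--     # buf and classifying it when a space (or the appended sentinel) ends it.
--     symbols = []
--     buf = []
--     for ch in rule + ' ':
--         if ch != ' ':
--             buf.append(ch)
--             continue
--         if len(buf) >= 2:
--             if buf[0] == '"' and buf[-1] == '"':
--                 symbols.append(''.join(buf[1:-1]))
--             elif buf[0] == 'x' and buf[1].isdigit():
--                 symbols.append('[' + ''.join(buf[3:]) + ']' if len(buf) > 3 else '[X]')
--         elif buf == ['@']:
--             return symbols
--         buf = []
--     return symbols
-- ===== Notes on version B (the rewrite author's own statement) =====
-- stated objective: alternative
-- what changed: A splits the rule on spaces and loops over the token list with per-token branches and a break on '@'; B never calls split: it is a single character-level state machine over the raw string (plus a sentinel space) that builds each token in a buffer and classifies/flushes it when a space ends it, returning early on a lone '@' buffer.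
import Mathlib
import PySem

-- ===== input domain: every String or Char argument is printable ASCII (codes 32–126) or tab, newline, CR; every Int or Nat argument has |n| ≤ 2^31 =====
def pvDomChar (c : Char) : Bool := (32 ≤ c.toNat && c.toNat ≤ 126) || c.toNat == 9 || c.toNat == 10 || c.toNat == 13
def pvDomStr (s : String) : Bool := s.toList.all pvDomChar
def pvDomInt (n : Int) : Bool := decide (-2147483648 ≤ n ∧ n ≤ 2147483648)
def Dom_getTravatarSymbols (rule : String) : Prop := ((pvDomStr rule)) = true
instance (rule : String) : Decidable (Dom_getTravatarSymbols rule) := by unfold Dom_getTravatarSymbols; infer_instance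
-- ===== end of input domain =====

-- B replaces A's split-then-loop (split(' '), per-token branches, break on '@') by a
-- single character-level state machine over the raw string (buffer + sentinel space).
-- Objective: alternative algorithm, same cost, same return value everywhere.

-- ===== PORT A =====
-- the for-loop of A with its early 'break': structural recursion over the tokens
def pvGoA : List String → List String
  | [] => []
  | s :: rest =>
    if PySem.Str.len s < 2 then
      (if s = "@" then [] else pvGoA rest)
    else if PySem.Str.pyGet? s 0 = some '"' ∧ PySem.Str.pyGet? s (-1) = some '"' then
      PySem.Str.slice s (some 1) (some (-1)) :: pvGoA rest
    else if PySem.Str.pyGet? s 0 = some 'x' ∧ (PySem.Str.pyGet? s 1).any PySem.Chars.isdigit then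
      (if PySem.Str.len s > 3 then
        PySem.Str.join "" ["[", PySem.Str.slice s (some 3) none, "]"]
      else "[X]") :: pvGoA rest
    else pvGoA rest

def getTravatarSymbols (rule : String) : List String :=
  pvGoA ((PySem.Str.split? rule " ").getD [])

-- ===== PORT B =====
-- the char loop of Source B: buf is the token being built, symbols the accumulator;
-- a space ends the current token and classifies it, '@' alone returns early
def pvScanB : List Char → List Char → List String → List String
  | [], _, symbols => symbols
  | c :: rest, buf, symbols =>
    if c ≠ ' ' then pvScanB rest (buf ++ [c]) symbols
    else if buf.length ≥ 2 then
      if PySem.List.pyGet? buf 0 = some '"' ∧ PySem.List.pyGet? buf (-1) = some '"' then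
        pvScanB rest [] (symbols ++ [String.ofList (PySem.List.slice buf (some 1) (some (-1)))])
      else if PySem.List.pyGet? buf 0 = some 'x' ∧ (PySem.List.pyGet? buf 1).any PySem.Chars.isdigit then
        pvScanB rest []
          (symbols ++ [if buf.length > 3
                       then String.ofList ('[' :: PySem.List.slice buf (some 3) none ++ [']'])
                       else "[X]"])
      else pvScanB rest [] symbols
    else if buf = ['@'] then symbols
    else pvScanB rest [] symbols

def getTravatarSymbols_alt (rule : String) : List String :=
  pvScanB (rule.toList ++ [' ']) [] []

-- ===== PRECONDITION & SPEC =====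
def Spec_getTravatarSymbols (rule : String) (out : List String) : Prop := out = getTravatarSymbols_alt rule
instance (rule : String) (out : List String) : Decidable (Spec_getTravatarSymbols rule out) := by unfold Spec_getTravatarSymbols; infer_instance

-- ===== CLAIM (what is proved, stated in full; the proofs are below) =====
def Claim_equal_getTravatarSymbols : Prop := ∀ (rule : String), Dom_getTravatarSymbols rule → Spec_getTravatarSymbols rule (getTravatarSymbols rule)

-- ===== LEMMAS AND PROOFS =====

-- the tokens of rule.split(' '), written as the structural recursion the proof inducts on
def pvTok : List Char → List Char → List (List Char)
  | [], cur => [cur]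
  | c :: rest, cur => if c = ' ' then cur :: pvTok rest [] else pvTok rest (cur ++ [c])

lemma pvGo_eq_pvTok : ∀ (fuel : Nat) (l cur : List Char) (acc : List (List Char)),
    l.length < fuel →
    PySem.Chars.splitOn.go [' '] fuel l cur acc = acc.reverse ++ pvTok l cur.reverse := by
  intro fuel
  induction fuel with
  | zero => intro l cur acc h; omega
  | succ n ih =>
    intro l cur acc h
    cases l with
    | nil => simp [PySem.Chars.splitOn.go, pvTok]
    | cons c rest =>
      rw [PySem.Chars.splitOn.go]
      by_cases hc : c = ' '
      · subst hc
        have hpre : ([' '].isPrefixOf (' ' :: rest)) = true := by simp [List.isPrefixOf]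
        rw [if_pos hpre]
        simp only [List.length_cons] at h
        rw [ih _ _ _ (by simpa using Nat.lt_of_succ_lt_succ h)]
        simp [pvTok]
      · have hpre : ([' '].isPrefixOf (c :: rest)) = false := by
          simp [List.isPrefixOf, Ne.symm hc]
        rw [if_neg (by simp [hpre])]
        simp only [List.length_cons] at h
        rw [ih _ _ _ (Nat.lt_of_succ_lt_succ h)]
        simp [pvTok, hc]

lemma pvSplit_eq_pvTok (rule : String) :
    (PySem.Str.split? rule " ").getD [] = (pvTok rule.toList []).map String.ofList := by
  have : PySem.Chars.splitOn rule.toList [' '] = pvTok rule.toList [] := by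
    unfold PySem.Chars.splitOn
    simpa using pvGo_eq_pvTok (rule.toList.length + 1) rule.toList [] [] (Nat.lt_succ_self _)
  simp [PySem.Str.split?, PySem.Chars.split?, this]

-- A's per-token branches, re-expressed with the list-level tests B's scanner uses
lemma pvTokenStep (t : List Char) (ts : List String) :
    pvGoA (String.ofList t :: ts) =
      if t.length ≥ 2 then
        (if PySem.List.pyGet? t 0 = some '"' ∧ PySem.List.pyGet? t (-1) = some '"' then
          String.ofList (PySem.List.slice t (some 1) (some (-1))) :: pvGoA ts
        else if PySem.List.pyGet? t 0 = some 'x' ∧ (PySem.List.pyGet? t 1).any PySem.Chars.isdigit then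
          (if t.length > 3
           then String.ofList ('[' :: PySem.List.slice t (some 3) none ++ [']'])
           else "[X]") :: pvGoA ts
        else pvGoA ts)
      else if t = ['@'] then [] else pvGoA ts := by
  rw [pvGoA.eq_def]
  have hlen : PySem.Str.len (String.ofList t) = (t.length : Int) := by
    simp [PySem.Str.len]
  have hat : (String.ofList t = "@") ↔ t = ['@'] := by
    constructor
    · intro h; have := congrArg String.toList h; simpa using this
    · intro h; subst h; rfl
  have hget : ∀ i : Int, PySem.Str.pyGet? (String.ofList t) i = PySem.List.pyGet? t i := by
    intro i; simp [PySem.Str.pyGet?, PySem.Chars.pyGet?]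
  have hslice : ∀ a b, PySem.Str.slice (String.ofList t) a b = String.ofList (PySem.List.slice t a b) := by
    intro a b; simp [PySem.Str.slice, PySem.Chars.slice]
  have hjoin : PySem.Str.join "" ["[", String.ofList (PySem.List.slice t (some 3) none), "]"] =
      String.ofList ('[' :: PySem.List.slice t (some 3) none ++ [']']) := by
    simp [PySem.Str.join, PySem.Chars.join, List.intercalate]
  have h3 : ((t.length : Int) > 3) ↔ t.length > 3 := by exact_mod_cast Iff.rfl
  simp only [hlen, hat, hget, hslice, hjoin, h3]
  by_cases h2 : t.length ≥ 2
  · rw [if_neg (by omega), if_pos h2]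
  · rw [if_pos (by omega), if_neg h2]

-- B's scan over the tokens of `cs` still open at buffer `buf` equals A's loop
lemma pvMain : ∀ (cs buf : List Char) (acc : List String),
    pvScanB (cs ++ [' ']) buf acc = acc ++ pvGoA ((pvTok cs buf).map String.ofList) := by
  intro cs
  induction cs with
  | nil =>
    intro buf acc
    simp only [List.nil_append, pvScanB, pvTok, List.map]
    rw [if_neg (fun h => h rfl), pvTokenStep buf []]
    by_cases h2 : buf.length ≥ 2
    · rw [if_pos h2, if_pos h2]
      by_cases hq : PySem.List.pyGet? buf 0 = some '"' ∧ PySem.List.pyGet? buf (-1) = some '"'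
      · rw [if_pos hq, if_pos hq]; simp [pvGoA]
      · rw [if_neg hq, if_neg hq]
        by_cases hx : PySem.List.pyGet? buf 0 = some 'x' ∧ (PySem.List.pyGet? buf 1).any PySem.Chars.isdigit
        · rw [if_pos hx, if_pos hx]; simp [pvGoA]
        · rw [if_neg hx, if_neg hx]; simp [pvGoA]
    · rw [if_neg h2, if_neg h2]
      by_cases hat : buf = ['@']
      · simp [hat]
      · rw [if_neg hat, if_neg hat]; simp [pvGoA]
  | cons c rest ih =>
    intro buf acc
    by_cases hc : c = ' '
    · subst hc
      simp only [List.cons_append, pvScanB]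
      rw [if_neg (fun h => h rfl)]
      simp only [pvTok, reduceIte, List.map]
      rw [pvTokenStep buf]
      by_cases h2 : buf.length ≥ 2
      · rw [if_pos h2, if_pos h2]
        by_cases hq : PySem.List.pyGet? buf 0 = some '"' ∧ PySem.List.pyGet? buf (-1) = some '"'
        · rw [if_pos hq, if_pos hq, ih]; simp
        · rw [if_neg hq, if_neg hq]
          by_cases hx : PySem.List.pyGet? buf 0 = some 'x' ∧ (PySem.List.pyGet? buf 1).any PySem.Chars.isdigit
          · rw [if_pos hx, if_pos hx, ih]; simp
          · rw [if_neg hx, if_neg hx]; exact ih [] acc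
      · rw [if_neg h2, if_neg h2]
        by_cases hat : buf = ['@']
        · simp [hat]
        · rw [if_neg hat, if_neg hat]; exact ih [] acc
    · simp only [List.cons_append, pvScanB, if_pos (by simpa using hc : (c ≠ ' '))]
      simp only [pvTok, if_neg hc]
      exact ih (buf ++ [c]) acc

-- ===== VERDICT (by name: the statement is the Claim_ definition above) =====
theorem getTravatarSymbols_spec : Claim_equal_getTravatarSymbols := by
  intro rule _
  unfold Spec_getTravatarSymbols getTravatarSymbols getTravatarSymbols_alt
  rw [pvSplit_eq_pvTok, pvMain]
  simp
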